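-- pv_equiv track=rewrite | github.com/LK-cyber-dev7/Math_Engine | main.py | _leading_unary
-- ===== SOURCE A (Python) =====
-- def _leading_unary(expr: str) -> tuple[int, str]:
--     sign = 1
--     i = 0
--
--     while i < len(expr) and expr[i] in "+-":
--         if expr[i] == "-":
--             sign *= -1
--         i += 1
--
--     return sign, expr[i:]
-- ===== SOURCE B (Python) =====
-- def _leading_unary(expr: str) -> tuple[int, str]:
--     tail = expr.lstrip("+-")
--     prefix = expr[:len(expr) - len(tail)]
--     return (-1 if prefix.count("-") % 2 else 1, tail)
-- ===== Notes on version B (the rewrite author's own statement) =====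
-- stated objective: idiomatic
-- what changed: Replaces the fused index-while loop that multiplies the sign along the way with a two-phase pass: lstrip of the sign characters locates the tail, then the sign is determined by the parity of the number of minus signs in the stripped prefix (via str.count).
import Mathlib
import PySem

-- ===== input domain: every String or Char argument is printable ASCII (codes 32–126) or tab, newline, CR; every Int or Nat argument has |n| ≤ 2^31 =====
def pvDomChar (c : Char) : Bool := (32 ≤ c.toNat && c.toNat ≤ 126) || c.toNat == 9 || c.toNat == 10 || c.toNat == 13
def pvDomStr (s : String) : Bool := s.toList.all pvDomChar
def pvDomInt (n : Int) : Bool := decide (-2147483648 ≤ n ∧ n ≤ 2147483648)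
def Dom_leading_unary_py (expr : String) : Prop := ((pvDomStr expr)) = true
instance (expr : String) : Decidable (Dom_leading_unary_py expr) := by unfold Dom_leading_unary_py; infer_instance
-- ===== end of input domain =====

-- B replaces A's fused sign-accumulating while loop with a two-phase pass:
-- strip the leading span of sign characters first, then count minus signs in the stripped prefix (objective: idiomatic).

-- ===== PORT A =====
-- A's while loop: recursion over the remaining characters, carrying the sign.
def leadingUnaryLoopA : Int → List Char → Int × List Char
  | sign, [] => (sign, [])
  | sign, c :: rest =>
      if c = '+' || c = '-' then
        leadingUnaryLoopA (if c = '-' then sign * (-1) else sign) rest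
      else (sign, c :: rest)

def leading_unary_py (expr : String) : Int × String :=
  let r := leadingUnaryLoopA 1 expr.toList
  (r.1, String.ofList r.2)

-- ===== PORT B =====
-- expr.lstrip("+-") ported by hand as dropWhile over the char list (exact: removes
-- exactly the leading characters from the set {'+','-'}); prefix.count('-') is List.count.
def leading_unary_py_alt (expr : String) : Int × String :=
  let cs := expr.toList
  let tail := cs.dropWhile (fun c => c = '+' || c = '-')
  let pre := cs.take (cs.length - tail.length)
  (if pre.count '-' % 2 = 1 then -1 else 1, String.ofList tail)

-- ===== PRECONDITION & SPEC =====
def Spec_leading_unary_py (expr : String) (out : Int × String) : Prop := out = leading_unary_py_alt expr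
instance (expr : String) (out : Int × String) : Decidable (Spec_leading_unary_py expr out) := by unfold Spec_leading_unary_py; infer_instance

-- ===== CLAIM (what is proved, stated in full; the proofs are below) =====
def Claim_equal_leading_unary_py : Prop := ∀ (expr : String), Dom_leading_unary_py expr → Spec_leading_unary_py expr (leading_unary_py expr)

-- ===== LEMMAS AND PROOFS =====
lemma leadingUnaryLoopA_spec (cs : List Char) (sign : Int) :
    leadingUnaryLoopA sign cs =
      (sign * (if (cs.takeWhile (fun c => c = '+' || c = '-')).count '-' % 2 = 1 then -1 else 1),
       cs.dropWhile (fun c => c = '+' || c = '-')) := by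
  induction cs generalizing sign with
  | nil => simp [leadingUnaryLoopA]
  | cons c rest ih =>
    by_cases h : (c = '+' || c = '-') = true
    · rw [show leadingUnaryLoopA sign (c :: rest)
            = leadingUnaryLoopA (if c = '-' then sign * (-1) else sign) rest by
          simp [leadingUnaryLoopA, h]]
      rw [ih]
      simp only [List.takeWhile_cons, List.dropWhile_cons, h, if_true, List.count_cons]
      by_cases hc : c = '-'
      · simp only [hc, if_true]
        rcases Nat.even_or_odd ((rest.takeWhile (fun c => c = '+' || c = '-')).count '-') with he | ho
        · have h2 : (rest.takeWhile (fun c => c = '+' || c = '-')).count '-' % 2 = 0 :=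
            Nat.even_iff.mp he
          simp [h2, Nat.add_mod]
        · have h2 : (rest.takeWhile (fun c => c = '+' || c = '-')).count '-' % 2 = 1 :=
            Nat.odd_iff.mp ho
          simp [h2, Nat.add_mod]
      · simp [hc, beq_iff_eq]
    · simp [leadingUnaryLoopA, h]

lemma take_sub_dropWhile (cs : List Char) (p : Char → Bool) :
    cs.take (cs.length - (cs.dropWhile p).length) = cs.takeWhile p := by
  have h : cs.length - (cs.dropWhile p).length = (cs.takeWhile p).length := by
    have := congrArg List.length (List.takeWhile_append_dropWhile (p := p) (l := cs))
    simp only [List.length_append] at this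
    omega
  rw [h]
  exact (List.prefix_iff_eq_take.mp (List.takeWhile_prefix p)).symm

-- ===== VERDICT (by name: the statement is the Claim_ definition above) =====
theorem leading_unary_py_spec : Claim_equal_leading_unary_py := by
  intro expr _
  unfold Spec_leading_unary_py leading_unary_py leading_unary_py_alt
  rw [leadingUnaryLoopA_spec]
  simp only [one_mul, take_sub_dropWhile]
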